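-- pv_equiv track=rewrite | github.com/v79688185/270201005 | lab1/quizquestion.py | non_alphanumeric_counter
-- ===== SOURCE A (Python) =====
-- def non_alphanumeric_counter(string):
--     if string == "":
--         return 0
--     else:
--         if string[0].isalpha() or string[0].isnumeric():
--             return  non_alphanumeric_counter(string[1:] )
--         else:
--             counter = 0
--             counter = counter + 1
--             return counter + non_alphanumeric_counter(string[1:])
-- ===== SOURCE B (Python) =====
-- def non_alphanumeric_counter(string):
--     counter = 0
--     for c in string:
--         if not (c.isalpha() or c.isnumeric()):
--             counter += 1
--     return counter
-- ===== Notes on version B (the rewrite author's own statement) =====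
-- stated objective: faster
-- what changed: Replaced per-character recursion with repeated slicing (string[1:] copies the tail each step) by a single iterative pass with a counter.
import Mathlib
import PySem

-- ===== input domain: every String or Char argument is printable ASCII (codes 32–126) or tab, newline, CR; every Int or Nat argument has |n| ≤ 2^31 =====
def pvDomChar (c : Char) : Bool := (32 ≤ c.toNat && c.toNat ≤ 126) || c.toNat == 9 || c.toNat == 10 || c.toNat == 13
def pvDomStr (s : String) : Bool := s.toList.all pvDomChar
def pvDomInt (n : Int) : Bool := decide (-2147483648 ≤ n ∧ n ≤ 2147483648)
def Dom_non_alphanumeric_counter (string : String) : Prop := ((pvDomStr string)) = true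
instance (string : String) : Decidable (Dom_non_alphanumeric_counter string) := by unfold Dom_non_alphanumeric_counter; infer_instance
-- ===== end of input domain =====

-- B replaces A's per-character recursion on string[1:] slices with a single iterative pass (objective: faster).
-- On the printable-ASCII domain, Python's str.isnumeric agrees with str.isdigit; both ports use PySem.Chars.isdigit for it (exact on this domain).

-- ===== PORT A =====
-- recursion on the character list: '' -> 0; head alnum -> recurse on tail; else 1 + recurse on tail
def nacListA : List Char → Int
  | [] => 0
  | c :: rest =>
    if PySem.Chars.isalpha c || PySem.Chars.isdigit c then nacListA rest
    else 1 + nacListA rest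

def non_alphanumeric_counter (string : String) : Int := nacListA string.toList

-- ===== PORT B =====
-- one pass: counter = 0; for c in string: if not (alpha or numeric): counter += 1
def non_alphanumeric_counter_alt (string : String) : Int :=
  string.toList.foldl
    (fun counter c =>
      if !(PySem.Chars.isalpha c || PySem.Chars.isdigit c) then counter + 1 else counter)
    0

-- ===== PRECONDITION & SPEC =====
def Spec_non_alphanumeric_counter (string : String) (out : Int) : Prop := out = non_alphanumeric_counter_alt string
instance (string : String) (out : Int) : Decidable (Spec_non_alphanumeric_counter string out) := by unfold Spec_non_alphanumeric_counter; infer_instance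

-- ===== CLAIM (what is proved, stated in full; the proofs are below) =====
def Claim_equal_non_alphanumeric_counter : Prop := ∀ (string : String), Dom_non_alphanumeric_counter string → Spec_non_alphanumeric_counter string (non_alphanumeric_counter string)

-- ===== LEMMAS AND PROOFS =====

-- ===== VERDICT (by name: the statement is the Claim_ definition above) =====
lemma nacListA_eq_countP (l : List Char) :
    nacListA l = (l.countP (fun c => !(PySem.Chars.isalpha c || PySem.Chars.isdigit c)) : Int) := by
  induction l with
  | nil => simp [nacListA]
  | cons c rest ih =>
    by_cases h : (PySem.Chars.isalpha c || PySem.Chars.isdigit c) = true <;>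
      simp only [nacListA, List.countP_cons, h, ih, Bool.not_true, Bool.not_false, if_true] <;> push_cast <;> ring

theorem non_alphanumeric_counter_spec : Claim_equal_non_alphanumeric_counter := by
  intro s _
  unfold Spec_non_alphanumeric_counter non_alphanumeric_counter non_alphanumeric_counter_alt
  rw [PySem.List.foldl_if_add_one, nacListA_eq_countP]
  ring
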